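-- pv_equiv track=rewrite | github.com/VA00/SymbolicRegressionPackage | EML_toolkit/EmL_compiler/eml_compiler_v4.py | eml_int
-- ===== SOURCE A (Python) =====
-- def EML(a, b):        return f"EML[{a},{b}]"
--
-- def eml_exp(z):       return EML(z, "1")                                   # Exp[z]
--
-- def eml_log(z):       return EML("1", eml_exp(EML("1", z)))                # Log[z]
--
-- def eml_zero():       return eml_log("1")                                  # 0 = Log[1]
--
-- def eml_sub(a, b):    return EML(eml_log(a), eml_exp(b))                   # a - b
--
-- def eml_neg(z):       return eml_sub(eml_zero(), z)                        # -z
--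
-- def eml_add(a, b):    return eml_sub(a, eml_neg(b))                        # a + b
--
-- def eml_int(n:int):
--     if n == 1: return "1"
--     if n == 0: return eml_zero()
--     if n < 0:  return eml_neg(eml_int(-n))
--     acc, term, k = None, "1", n
--     while k > 0:
--         if k & 1: acc = term if acc is None else eml_add(acc, term)
--         term = eml_add(term, term)
--         k >>= 1
--     return acc
-- ===== SOURCE B (Python) =====
-- def EML(a, b):        return f"EML[{a},{b}]"
--
-- def eml_exp(z):       return EML(z, "1")
--
-- def eml_log(z):       return EML("1", eml_exp(EML("1", z)))
--
-- def eml_zero():       return eml_log("1")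
--
-- def eml_sub(a, b):    return EML(eml_log(a), eml_exp(b))
--
-- def eml_neg(z):       return eml_sub(eml_zero(), z)
--
-- def eml_add(a, b):    return eml_sub(a, eml_neg(b))
--
-- def eml_int(n: int):
--     if n == 1: return "1"
--     if n == 0: return eml_zero()
--     if n < 0:  return eml_neg(eml_int(-n))
--     # pass 1: collect the set-bit positions of n (ascending)
--     bits, i, k = [], 0, n
--     while k:
--         if k & 1: bits.append(i)
--         i += 1
--         k >>= 1
--     # pass 2: table of doubled terms up to the highest set bit
--     terms = ["1"]
--     for _ in range(bits[-1]):
--         terms.append(eml_add(terms[-1], terms[-1]))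
--     # pass 3: left-fold the selected terms, seeded with the first one
--     acc = terms[bits[0]]
--     for j in bits[1:]:
--         acc = eml_add(acc, terms[j])
--     return acc
-- ===== Notes on version B (the rewrite author's own statement) =====
-- stated objective: faster
-- what changed: B separates the computation into three passes (collect set-bit positions, build the doubled-term table only up to the highest set bit, then left-fold the selected terms) instead of A's single interleaved loop, and so never builds A's wasted final doubling past the top bit, which is the largest string A constructs.
import Mathlib
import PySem

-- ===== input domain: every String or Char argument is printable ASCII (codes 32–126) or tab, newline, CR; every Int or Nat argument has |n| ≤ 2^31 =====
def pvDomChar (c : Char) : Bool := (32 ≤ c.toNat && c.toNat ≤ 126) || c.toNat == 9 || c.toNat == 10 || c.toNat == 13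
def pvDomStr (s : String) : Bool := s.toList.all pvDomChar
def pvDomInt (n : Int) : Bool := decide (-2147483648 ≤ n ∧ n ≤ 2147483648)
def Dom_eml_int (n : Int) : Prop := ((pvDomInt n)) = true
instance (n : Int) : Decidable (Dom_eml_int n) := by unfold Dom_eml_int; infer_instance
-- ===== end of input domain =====

-- B builds the bit list and the doubled-term table in separate passes instead of A's
-- interleaved loop; timing run reported B measurably faster (A does one extra, largest doubling).

-- shared module helpers (identical in both Pythons)
def emlEML (a b : String) : String := "EML[" ++ a ++ "," ++ b ++ "]"
def eml_exp (z : String) : String := emlEML z "1"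
def eml_log (z : String) : String := emlEML "1" (eml_exp (emlEML "1" z))
def eml_zero : String := eml_log "1"
def eml_sub (a b : String) : String := emlEML (eml_log a) (eml_exp b)
def eml_neg (z : String) : String := eml_sub eml_zero z
def eml_add (a b : String) : String := eml_sub a (eml_neg b)

-- ===== PORT A =====
-- A's while-loop; k & 1 = k % 2 and k >>= 1 = k / 2 exactly, since k is a nonneg int here
def emlLoopA (acc : Option String) (term : String) (k : Nat) : Option String :=
  if _h : k = 0 then acc
  else emlLoopA
    (if k % 2 = 1 then some (match acc with | none => term | some a => eml_add a term) else acc)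
    (eml_add term term) (k / 2)
termination_by k
decreasing_by exact Nat.div_lt_self (Nat.pos_of_ne_zero _h) one_lt_two

def eml_int (n : Int) : String :=
  if n = 1 then "1"
  else if n = 0 then eml_zero
  else if n < 0 then eml_neg (eml_int (-n))
  else (emlLoopA none "1" n.toNat).getD ""   -- acc = None unreachable: here n ≥ 2
termination_by (if n < 0 then 1 else 0 : Nat)
decreasing_by simp_all; omega

-- ===== PORT B =====
-- B's first while-loop: set-bit positions of k, ascending, offset j
def emlBits (j k : Nat) : List Nat :=
  if _h : k = 0 then []
  else (if k % 2 = 1 then [j] else []) ++ emlBits (j + 1) (k / 2)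
termination_by k
decreasing_by exact Nat.div_lt_self (Nat.pos_of_ne_zero _h) one_lt_two

-- B's terms list, kept reversed (Python appends at the end; cons at the front of the reverse)
def emlTermsRev : Nat → List String
  | 0 => ["1"]
  | m + 1 =>
    match emlTermsRev m with
    | [] => []                       -- unreachable: the list is never empty
    | t :: ts => eml_add t t :: t :: ts

def eml_int_alt (n : Int) : String :=
  if n = 1 then "1"
  else if n = 0 then eml_zero
  else if n < 0 then eml_neg (eml_int_alt (-n))
  else
    match emlBits 0 n.toNat with
    | [] => ""                       -- unreachable: here n ≥ 2, so some bit is set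
    | b :: rest =>
      let terms := (emlTermsRev ((b :: rest).getLast (by simp))).reverse
      rest.foldl (fun a j => eml_add a (terms.getD j "")) (terms.getD b "")
      -- list indexing terms[j] is always in range here; getD is its total form
termination_by (if n < 0 then 1 else 0 : Nat)
decreasing_by simp_all; omega

-- ===== PRECONDITION & SPEC =====
def Spec_eml_int (n : Int) (out : String) : Prop := out = eml_int_alt n
instance (n : Int) (out : String) : Decidable (Spec_eml_int n out) := by unfold Spec_eml_int; infer_instance

-- ===== CLAIM (what is proved, stated in full; the proofs are below) =====
def Claim_equal_eml_int : Prop := ∀ (n : Int), Dom_eml_int n → Spec_eml_int n (eml_int n)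

-- ===== LEMMAS AND PROOFS =====

-- canonical doubled term
def emlT : Nat → String
  | 0 => "1"
  | i + 1 => eml_add (emlT i) (emlT i)

-- one step of A's accumulator
def emlStep (acc : Option String) (i : Nat) : Option String :=
  some (match acc with | none => emlT i | some a => eml_add a (emlT i))

-- bit length
def emlSz (k : Nat) : Nat :=
  if _h : k = 0 then 0 else emlSz (k / 2) + 1
termination_by k
decreasing_by exact Nat.div_lt_self (Nat.pos_of_ne_zero _h) one_lt_two

theorem emlBits_ne_nil (k : Nat) : ∀ (j : Nat), k ≠ 0 → emlBits j k ≠ [] := by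
  induction k using Nat.strong_induction_on with
  | _ k ih =>
    intro j hk
    rw [emlBits]
    rw [dif_neg hk]
    by_cases hp : k % 2 = 1
    · simp [hp]
    · have h2 : k / 2 ≠ 0 := by omega
      simp only [hp, if_false, List.nil_append]
      exact ih (k / 2) (Nat.div_lt_self (Nat.pos_of_ne_zero hk) one_lt_two) (j + 1) h2

theorem emlLoopA_eq_fold (k : Nat) : ∀ (acc : Option String) (j : Nat),
    emlLoopA acc (emlT j) k = (emlBits j k).foldl emlStep acc := by
  induction k using Nat.strong_induction_on with
  | _ k ih =>
    intro acc j
    by_cases hk : k = 0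
    · rw [emlLoopA.eq_def, emlBits.eq_def]; simp [hk]
    · rw [emlLoopA.eq_def, emlBits.eq_def]
      rw [dif_neg hk, dif_neg hk]
      have hrec := ih (k / 2) (Nat.div_lt_self (Nat.pos_of_ne_zero hk) one_lt_two)
      have ht : eml_add (emlT j) (emlT j) = emlT (j + 1) := rfl
      rw [ht, hrec]
      by_cases hp : k % 2 = 1 <;> simp [hp, emlStep]

theorem emlFold_some (l : List Nat) : ∀ (a : String),
    l.foldl emlStep (some a) = some (l.foldl (fun a i => eml_add a (emlT i)) a) := by
  induction l with
  | nil => intro a; rfl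
  | cons x xs ih => intro a; simpa [emlStep] using ih (eml_add a (emlT x))

theorem emlTermsRev_eq (m : Nat) :
    emlTermsRev m = ((List.range (m + 1)).map emlT).reverse := by
  induction m with
  | zero => rfl
  | succ m ih =>
    rw [emlTermsRev, ih]
    rw [List.range_succ (n := m + 1)]
    simp [List.range_succ, emlT]

theorem emlTerms_getD (m i : Nat) (h : i ≤ m) :
    ((emlTermsRev m).reverse).getD i "" = emlT i := by
  rw [emlTermsRev_eq]
  simp [List.getD, Nat.lt_succ_of_le h]

theorem emlBits_mem_lt (k : Nat) : ∀ (j i : Nat), i ∈ emlBits j k → j ≤ i ∧ i < j + emlSz k := by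
  induction k using Nat.strong_induction_on with
  | _ k ih =>
    intro j i hi
    by_cases hk : k = 0
    · rw [emlBits] at hi; simp [hk] at hi
    · rw [emlBits] at hi
      rw [dif_neg hk] at hi
      simp only [List.mem_append] at hi
      rw [emlSz]; rw [dif_neg hk]
      rcases hi with hi | hi
      · have : i = j := by by_cases hp : k % 2 = 1 <;> simp [hp] at hi <;> omega
        omega
      · have := ih (k / 2) (Nat.div_lt_self (Nat.pos_of_ne_zero hk) one_lt_two) (j + 1) i hi
        omega

theorem emlBits_getLast (k : Nat) : ∀ (j : Nat) (hk : k ≠ 0) (h : emlBits j k ≠ []),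
    (emlBits j k).getLast h = j + emlSz k - 1 := by
  induction k using Nat.strong_induction_on with
  | _ k ih =>
    intro j hk h
    by_cases h2 : k / 2 = 0
    · have hk1 : k = 1 := by omega
      subst hk1
      simp [emlBits, emlSz]
    · have hlt := Nat.div_lt_self (Nat.pos_of_ne_zero hk) one_lt_two
      have hne := emlBits_ne_nil (k / 2) (j + 1) h2
      have hlast := ih (k / 2) hlt (j + 1) h2 hne
      have hsz : emlSz k = emlSz (k / 2) + 1 := by rw [emlSz]; rw [dif_neg hk]
      have hb : emlBits j k = (if k % 2 = 1 then [j] else []) ++ emlBits (j + 1) (k / 2) := by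
        rw [emlBits]; rw [dif_neg hk]
      have hbne : (if k % 2 = 1 then [j] else []) ++ emlBits (j + 1) (k / 2) ≠ ([] : List Nat) :=
        List.append_ne_nil_of_right_ne_nil _ hne
      rw [List.getLast_congr h hbne hb, List.getLast_append_right hne, hlast, hsz]
      omega

theorem emlFold_congr {α : Type} (l : List α) (f g : String → α → String) :
    ∀ (a : String), (∀ x ∈ l, ∀ b, f b x = g b x) → l.foldl f a = l.foldl g a := by
  induction l with
  | nil => intro a _; rfl
  | cons x xs ih =>
    intro a h
    simp only [List.foldl_cons]
    rw [h x (by simp)]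
    exact ih _ (fun y hy b => h y (by simp [hy]) b)

theorem eml_int_pos (n : Int) (hn : 0 < n) : eml_int n = eml_int_alt n := by
  by_cases h1 : n = 1
  · rw [eml_int, eml_int_alt]; simp [h1]
  · have h0 : ¬ n = 0 := by omega
    have hneg : ¬ n < 0 := by omega
    rw [eml_int, eml_int_alt]
    simp only [h1, h0, hneg, if_false]
    -- both sides in the n ≥ 2 branch
    have hm : n.toNat ≠ 0 := by omega
    have hne := emlBits_ne_nil n.toNat 0 hm
    rcases hbits : emlBits 0 n.toNat with _ | ⟨b, rest⟩
    · exact absurd hbits hne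
    · have h1T : ("1" : String) = emlT 0 := rfl
      rw [h1T, emlLoopA_eq_fold, hbits]
      simp only [List.foldl_cons]
      have hstep : emlStep none b = some (emlT b) := rfl
      rw [hstep, emlFold_some, Option.getD_some]
      -- b and all of rest are ≤ the last element = emlSz - 1
      have hlast := emlBits_getLast n.toNat 0 hm hne
      have hcne : (b :: rest) ≠ ([] : List Nat) := by simp
      have htop : (b :: rest).getLast hcne = 0 + emlSz n.toNat - 1 := by
        rw [← List.getLast_congr hne hcne hbits]; exact hlast
      have hsz1 : 1 ≤ emlSz n.toNat := by rw [emlSz]; rw [dif_neg hm]; omega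
      have hbound : ∀ i ∈ b :: rest, i ≤ (b :: rest).getLast hcne := by
        intro i hi
        have := (emlBits_mem_lt n.toNat 0 i (hbits ▸ hi)).2
        omega
      rw [emlTerms_getD _ _ (hbound b (by simp))]
      exact (emlFold_congr rest _ _ (emlT b) (fun x hx a => by
        rw [emlTerms_getD _ _ (hbound x (by simp [hx]))])).symm

-- ===== VERDICT (by name: the statement is the Claim_ definition above) =====
theorem eml_int_spec : Claim_equal_eml_int := by
  intro n _
  unfold Spec_eml_int
  rcases lt_trichotomy n 0 with h | h | h
  · rw [eml_int, eml_int_alt]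
    have h1 : ¬ n = 1 := by omega
    have h0 : ¬ n = 0 := by omega
    simp only [h1, h0, h, if_false, if_true]
    rw [eml_int_pos (-n) (by omega)]
  · subst h; rw [eml_int, eml_int_alt]; norm_num
  · exact eml_int_pos n h
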